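-- pv_equiv track=rewrite | github.com/igorvanloo/Project-Euler-Explained | Finished Problems/pe00501 - Eight Divisors.py | primepi_array
-- ===== SOURCE A (Python) =====
-- import time, math
--
-- def list_primality(n):
--     result = [True] * (n + 1)
--     result[0] = result[1] = False
--     for i in range(int(math.sqrt(n)) + 1):
--         if result[i]:
--             for j in range(2 * i, len(result), i):
--                 result[j] = False
--     return result
--
-- def primepi_array(limit):  # Returns an array such that array[x] = number of primes < x
--     prime_gen = list_primality(limit + 50)
--     primes = [x for x in range(len(prime_gen)) if prime_gen[x]]
--     array = [0] * (limit + 1)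
--     p_index = 0
--     for x in range(1, limit + 1):
--         while True:
--             if primes[p_index] > x:
--                 array[x] = p_index
--                 break
--             p_index += 1
--     return array
-- ===== SOURCE B (Python) =====
-- import math
--
-- def list_primality(n):
--     result = [True] * (n + 1)
--     result[0] = result[1] = False
--     for i in range(int(math.sqrt(n)) + 1):
--         if result[i]:
--             for j in range(2 * i, len(result), i):
--                 result[j] = False
--     return result
--
-- def primepi_array(limit):  # array[x] = number of primes <= x
--     prime_gen = list_primality(limit + 50)
--     array = [0] * (limit + 1)
--     count = 0
--     for x in range(1, limit + 1):
--         if prime_gen[x]: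
--             count += 1
--         array[x] = count
--     return array
-- ===== Notes on version B (the rewrite author's own statement) =====
-- stated objective: simpler
-- what changed: Keeps the module's sieve helper but replaces the intermediate primes list plus the per-x inner while-loop pointer walk by a single prefix-sum scan over the sieve with one running counter.
import Mathlib
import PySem

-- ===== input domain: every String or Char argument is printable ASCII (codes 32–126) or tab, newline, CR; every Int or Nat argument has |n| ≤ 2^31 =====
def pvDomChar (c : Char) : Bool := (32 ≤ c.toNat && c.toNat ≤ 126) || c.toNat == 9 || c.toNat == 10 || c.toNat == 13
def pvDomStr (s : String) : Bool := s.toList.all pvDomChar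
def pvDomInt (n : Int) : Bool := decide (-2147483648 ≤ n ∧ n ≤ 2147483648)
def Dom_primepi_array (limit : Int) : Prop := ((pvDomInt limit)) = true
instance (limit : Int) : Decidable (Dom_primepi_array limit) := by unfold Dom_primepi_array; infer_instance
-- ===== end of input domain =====

-- B keeps A's sieve helper but replaces the primes list + per-x pointer walk by one prefix-count scan (objective: simpler).

-- ===== PORT A =====
-- helper: one outer sieve iteration ('if result[i]: for j in range(2*i, len(result), i): result[j] = False')
def pvMark (res : List Bool) (i : Int) : List Bool :=
  if PySem.List.pyGetD res i false then
    (PySem.List.pyRange (2 * i) (res.length : Int) i).foldl (fun r j => r.set j.toNat false) res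
  else res

-- list_primality(n): '[True] * (n+1)', 'result[0] = result[1] = False' (out-of-range assignment raises
-- in Python — those n are outside Pre_), then the sieve loop. int(math.sqrt(n)) is exact as Int.sqrt
-- for every n reachable from Dom (n ≤ 2^31 + 50 ≪ 2^52).
def list_primality (n : Int) : List Bool :=
  let result : List Bool := List.replicate (n + 1).toNat true
  let result := (result.set 0 false).set 1 false
  (PySem.List.pyRange 0 (Int.sqrt n + 1) 1).foldl pvMark result

-- the inner 'while True' pointer walk: first index ≥ p whose prime exceeds x.
-- When p runs off the end Python raises IndexError (excluded by Pre_); the port returns p there.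
def pvWalk (primes : List Int) (x : Int) (p : Nat) : Nat :=
  if h : p < primes.length then
    if x < primes[p] then p else pvWalk primes x (p + 1)
  else p
termination_by primes.length - p

def primepi_array (limit : Int) : List Int :=
  let prime_gen := list_primality (limit + 50)
  let primes := (PySem.List.pyRange 0 (prime_gen.length : Int) 1).filter
      (fun x => PySem.List.pyGetD prime_gen x false)
  let st := (PySem.List.pyRange 1 (limit + 1) 1).foldl
      (fun (st : List Int × Nat) x =>
        let p := pvWalk primes x st.2
        (st.1.set x.toNat (p : Int), p))
      (List.replicate (limit + 1).toNat 0, 0)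
  st.1

-- ===== PORT B =====
def primepi_array_alt (limit : Int) : List Int :=
  let prime_gen := list_primality (limit + 50)
  let st := (PySem.List.pyRange 1 (limit + 1) 1).foldl
      (fun (st : List Int × Int) x =>
        let c := if PySem.List.pyGetD prime_gen x false then st.2 + 1 else st.2
        (st.1.set x.toNat c, c))
      (List.replicate (limit + 1).toNat 0, 0)
  st.1

-- ===== PRECONDITION & SPEC =====
-- Pre_ excludes exactly the inputs where the Python A raises IndexError: limit ≤ -50 (the sieve's
-- 'result[1] = False' is out of range) and limit ≥ 1 with no prime in (limit, limit+50] (the pointer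
-- walk runs off the end of the primes list).
def Pre_primepi_array (limit : Int) : Prop :=
  -49 ≤ limit ∧ (limit ≤ 0 ∨ ∃ k < 50, Nat.Prime (limit.toNat + 1 + k))
instance (limit : Int) : Decidable (Pre_primepi_array limit) := by unfold Pre_primepi_array; infer_instance
def pvWitness_primepi_array : Int := 10

def Spec_primepi_array (limit : Int) (out : List Int) : Prop := out = primepi_array_alt limit
instance (limit : Int) (out : List Int) : Decidable (Spec_primepi_array limit out) := by unfold Spec_primepi_array; infer_instance

-- ===== CLAIM (what is proved, stated in full; the proofs are below) =====
def Claim_equal_primepi_array : Prop := ∀ (limit : Int), Dom_primepi_array limit → Pre_primepi_array limit → Spec_primepi_array limit (primepi_array limit)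

-- ===== LEMMAS AND PROOFS =====

-- proof-side abbreviations: the sieve's prime indices, and the prefix prime count
def pvPrimesN (g : List Bool) : List Nat := (List.range g.length).filter (fun y => g.getD y false)
def pvPrimesI (g : List Bool) : List Int := (pvPrimesN g).map (fun k => Int.ofNat k)
def pvCnt (g : List Bool) (t : Nat) : Nat := ((List.range (t+1)).filter (fun y => g.getD y false)).length

-- the sieve body only writes `false`: lengths unchanged, `false` entries stay, untouched entries stay
theorem pv_foldl_set_length (l : List Int) (res : List Bool) :
    (l.foldl (fun r j => r.set j.toNat false) res).length = res.length := by
  induction l generalizing res with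
  | nil => rfl
  | cons j t ih => simpa using ih (res.set j.toNat false)

theorem pv_foldl_set_getD_eq (l : List Int) (res : List Bool) (k : Nat)
    (h : ∀ j ∈ l, j.toNat ≠ k) :
    (l.foldl (fun r j => r.set j.toNat false) res).getD k false = res.getD k false := by
  induction l generalizing res with
  | nil => rfl
  | cons j t ih =>
      have hj : j.toNat ≠ k := h j (by simp)
      have := ih (res.set j.toNat false) (fun a ha => h a (by simp [ha]))
      simp only [List.foldl_cons] at *
      rw [this, List.getD, List.getD, List.getElem?_set]
      simp [hj]

theorem pv_foldl_set_getD_true (l : List Int) (res : List Bool) (k : Nat)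
    (h : (l.foldl (fun r j => r.set j.toNat false) res).getD k false = true) :
    res.getD k false = true := by
  induction l generalizing res with
  | nil => exact h
  | cons j t ih =>
      have := ih (res.set j.toNat false) (by simpa using h)
      by_cases hj : j.toNat = k
      · exfalso
        rw [hj, List.getD, List.getElem?_set, if_pos rfl] at this
        split at this <;> simp at this
      · rwa [List.getD, List.getElem?_set, if_neg hj, ← List.getD] at this

theorem pvMark_getD_true (res : List Bool) (i : Int) (k : Nat)
    (h : (pvMark res i).getD k false = true) : res.getD k false = true := by
  unfold pvMark at h
  split at h
  · exact pv_foldl_set_getD_true _ _ _ h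
  · exact h

theorem pv_sieve_getD_true (l : List Int) (res : List Bool) (k : Nat)
    (h : (l.foldl pvMark res).getD k false = true) : res.getD k false = true := by
  induction l generalizing res with
  | nil => exact h
  | cons i t ih => exact pvMark_getD_true _ _ _ (ih (pvMark res i) (by simpa using h))

-- entry 0 of the sieve is always false
theorem list_primality_getD_zero (n : Int) : (list_primality n).getD 0 false = false := by
  by_contra hne
  rw [Bool.not_eq_false] at hne
  unfold list_primality at hne
  have h := pv_sieve_getD_true _ _ _ hne
  rcases Nat.eq_zero_or_pos (n+1).toNat with h0 | h0
  · simp [List.getD, h0] at h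
  · rw [List.getD, List.getElem?_set, if_neg (by omega), List.getElem?_set, if_pos rfl] at h
    split at h <;> simp at h

-- invariant carried through the sieve loop for a prime index p
def pvInv (p : Nat) (res : List Bool) : Prop :=
  res.getD 0 false = false ∧ res.getD 1 false = false ∧ res.getD p false = true

theorem pvMark_inv (p : Nat) (hp : Nat.Prime p) (i : Int) (hi : 0 ≤ i) (res : List Bool)
    (h : pvInv p res) : pvInv p (pvMark res i) := by
  obtain ⟨h0, h1, hpv⟩ := h
  unfold pvMark
  split
  · rename_i hguard
    rw [PySem.List.pyGetD_of_nonneg _ _ hi] at hguard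
    have hi2 : 2 ≤ i := by
      rcases (by omega : i = 0 ∨ i = 1 ∨ 2 ≤ i) with rfl | rfl | h'
      · rw [show ((0:Int).toNat) = 0 from rfl, h0] at hguard; exact absurd hguard (by simp)
      · rw [show ((1:Int).toNat) = 1 from rfl, h1] at hguard; exact absurd hguard (by simp)
      · exact h'
    have hmem : ∀ j ∈ PySem.List.pyRange (2 * i) ((res.length : Int)) i,
        4 ≤ j ∧ ∃ m : Int, 0 ≤ m ∧ j = (m + 2) * i := by
      intro j hj
      rw [PySem.List.mem_pyRange_iff_of_pos (by omega)] at hj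
      obtain ⟨hlo, _, c, hc⟩ := hj
      have hc0 : 0 ≤ c := by nlinarith
      refine ⟨by nlinarith, c, hc0, by linarith⟩
    refine ⟨?_, ?_, ?_⟩
    · rw [pv_foldl_set_getD_eq _ _ _ (fun j hj => by have := (hmem j hj).1; omega)]; exact h0
    · rw [pv_foldl_set_getD_eq _ _ _ (fun j hj => by have := (hmem j hj).1; omega)]; exact h1
    · rw [pv_foldl_set_getD_eq _ _ _ ?_]; exact hpv
      intro j hj
      obtain ⟨hj4, m, hm0, hmeq⟩ := hmem j hj
      intro hjp
      have hiton : i.toNat ∣ p := by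
        refine ⟨(m + 2).toNat, ?_⟩
        rw [← hjp, hmeq, Int.toNat_mul (by omega) (by omega), Nat.mul_comm]
      rcases (Nat.Prime.eq_one_or_self_of_dvd hp _ hiton) with h' | h'
      · omega
      · have hthis : p = (m + 2).toNat * i.toNat := by
          rw [← hjp, hmeq, Int.toNat_mul (by omega) (by omega)]
        have hmn : 2 ≤ (m + 2).toNat := by omega
        have hpn : 2 ≤ i.toNat := by omega
        rw [h'] at hthis hpn
        nlinarith
  · exact ⟨h0, h1, hpv⟩

-- the sieve never kills a prime entry
theorem list_primality_getD_prime (n : Int) (p : Nat) (hn : 1 ≤ n) (hp : Nat.Prime p)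
    (hlt : p < (n+1).toNat) : (list_primality n).getD p false = true := by
  unfold list_primality
  have h2 : 2 ≤ (n+1).toNat := by omega
  have hp2 : 2 ≤ p := hp.two_le
  have hinit : pvInv p (((List.replicate (n+1).toNat true).set 0 false).set 1 false) := by
    refine ⟨?_, ?_, ?_⟩
    · rw [List.getD, List.getElem?_set, if_neg (by omega), List.getElem?_set, if_pos rfl]
      split <;> rfl
    · rw [List.getD, List.getElem?_set, if_pos rfl]
      split <;> rfl
    · rw [List.getD, List.getElem?_set, if_neg (by omega), List.getElem?_set, if_neg (by omega),
        List.getElem?_replicate, if_pos hlt]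
      rfl
  have hstep : ∀ (l : List Int) (res : List Bool), (∀ i ∈ l, 0 ≤ i) → pvInv p res →
      pvInv p (l.foldl pvMark res) := by
    intro l
    induction l with
    | nil => intro res _ h; exact h
    | cons i t ih =>
        intro res hmem h
        exact ih (pvMark res i) (fun a ha => hmem a (by simp [ha]))
          (pvMark_inv p hp i (hmem i (by simp)) res h)
  exact (hstep _ _ (fun i hi => ((PySem.List.mem_pyRange_one).mp hi).1) hinit).2.2

theorem list_primality_length (n : Int) : (list_primality n).length = (n+1).toNat := by
  unfold list_primality
  have h : ∀ (l : List Int) (res : List Bool), (l.foldl pvMark res).length = res.length := by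
    intro l
    induction l with
    | nil => intro res; rfl
    | cons i t ih =>
        intro res
        rw [List.foldl_cons, ih]
        unfold pvMark
        split
        · exact pv_foldl_set_length _ _
        · rfl
  simp [h]

-- sorted-list counting: an element is ≤ x exactly when its index is below the count of elements ≤ x
theorem pv_sorted_count (l : List Int) (hs : l.Pairwise (· < ·)) (x : Int) :
    ∀ (i : Nat) (q : Int), l[i]? = some q →
      (q ≤ x ↔ i < (l.filter (fun a => decide (a ≤ x))).length) := by
  induction l with
  | nil => intro i q h; simp at h
  | cons a t ih =>
      rw [List.pairwise_cons] at hs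
      intro i q h
      match i with
      | 0 =>
          rw [List.getElem?_cons_zero] at h
          injection h with h; subst h
          rw [List.filter_cons]
          by_cases hax : a ≤ x
          · rw [if_pos (by simp [hax])]; simp [hax]
          · have hnil : List.filter (fun a => decide (a ≤ x)) t = [] :=
              List.filter_eq_nil_iff.mpr (by intro b hb; have := hs.1 b hb; simp; omega)
            rw [if_neg (by simp [hax])]; simp [hax, hnil]
      | i + 1 =>
          rw [List.getElem?_cons_succ] at h
          rw [List.filter_cons]
          by_cases hax : a ≤ x
          · rw [if_pos (by simp [hax]), List.length_cons, ih hs.2 i q h]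
            omega
          · have hqmem : q ∈ t := List.mem_of_getElem? h
            have hnil : List.filter (fun a => decide (a ≤ x)) t = [] :=
              List.filter_eq_nil_iff.mpr (by intro b hb; have := hs.1 b hb; simp; omega)
            have hq : ¬ (q ≤ x) := by have := hs.1 q hqmem; omega
            rw [if_neg (by simp [hax])]
            simp [hnil, hq]

-- the pointer walk lands exactly on C = (number of list elements ≤ x)
theorem pvWalk_eq (d : Nat) : ∀ (l : List Int) (x : Int) (C p : Nat), C - p = d → p ≤ C →
    C < l.length →
    (∀ (i : Nat) (q : Int), i < C → l[i]? = some q → q ≤ x) →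
    (∀ q : Int, l[C]? = some q → x < q) →
    pvWalk l x p = C := by
  induction d with
  | zero =>
      intro l x C p hd hpC hCl hle hgt
      have hpc : p = C := by omega
      subst hpc
      rw [pvWalk, dif_pos hCl, if_pos (hgt _ (List.getElem?_eq_getElem hCl))]
  | succ d ih =>
      intro l x C p hd hpC hCl hle hgt
      have hplt : p < C := by omega
      have hpl : p < l.length := by omega
      have hq : l[p] ≤ x := hle p _ hplt (List.getElem?_eq_getElem hpl)
      rw [pvWalk, dif_pos hpl, if_neg (by omega)]
      exact ih l x C (p+1) (by omega) (by omega) hCl hle hgt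

-- A's primes list is the cast of the sieve's prime indices
theorem pv_primes_eq (g : List Bool) :
    (PySem.List.pyRange 0 ((g.length : Int)) 1).filter (fun x => PySem.List.pyGetD g x false)
      = pvPrimesI g := by
  rw [PySem.List.pyRange_one, List.filter_map]
  rw [pvPrimesI, pvPrimesN]
  simp only [Int.sub_zero, Int.toNat_natCast, zero_add]
  exact congrArg _ (List.filter_congr (fun k _ => by
    simp [Function.comp, PySem.List.pyGetD_natCast]))

theorem pv_primes_pairwise (g : List Bool) : (pvPrimesI g).Pairwise (· < ·) := by
  refine List.Pairwise.map _ (fun a b h => ?_) (List.Pairwise.filter _ List.pairwise_lt_range)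
  exact Int.ofNat_lt.mpr h

theorem pv_cnt_bridge (g : List Bool) (t : Nat) (ht : t < g.length) :
    (((pvPrimesI g).filter (fun a => decide (a ≤ (t : Int)))).length) = pvCnt g t := by
  rw [pvPrimesI, List.filter_map, List.length_map, pvPrimesN, List.filter_filter, pvCnt]
  have hsplit : g.length = (t+1) + (g.length - (t+1)) := by omega
  rw [hsplit, List.range_add, List.filter_append]
  have h2 : List.filter (fun a => ((fun a => decide (a ≤ (t:Int))) ∘ fun k => Int.ofNat k) a && g.getD a false)
      (List.map (fun x => t + 1 + x) (List.range (g.length - (t + 1)))) = [] := by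
    apply List.filter_eq_nil_iff.mpr
    intro b hb
    simp only [List.mem_map] at hb
    obtain ⟨x, _, rfl⟩ := hb
    simp only [Function.comp, Bool.and_eq_true, decide_eq_true_eq, Int.ofNat_eq_natCast]
    intro hle
    exfalso
    omega
  rw [h2, List.append_nil]
  apply congrArg
  apply List.filter_congr
  intro k hk
  simp only [List.mem_range] at hk
  have hkt : ((k : Int) ≤ (t : Int)) := by exact_mod_cast (by omega : k ≤ t)
  simp [Function.comp, hkt]

theorem pv_cnt_succ (g : List Bool) (t : Nat) :
    pvCnt g (t+1) = pvCnt g t + (if g.getD (t+1) false then 1 else 0) := by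
  rw [pvCnt, pvCnt, List.range_succ, List.filter_append, List.length_append]
  cases h : g.getD (t+1) false <;> rw [List.getD] at h <;> simp [h]

theorem pv_cnt_zero (g : List Bool) (h : g.getD 0 false = false) : pvCnt g 0 = 0 := by
  rw [List.getD] at h
  simp [pvCnt, List.range_one, h]

theorem pv_cnt_lt (g : List Bool) (t : Nat) (pstar : Nat) (hpsL : pstar < g.length)
    (hpst : g.getD pstar false = true) (ht : t < g.length) (hbig : t < pstar) :
    pvCnt g t < (pvPrimesI g).length := by
  rw [← pv_cnt_bridge g t ht]
  have hmem : Int.ofNat pstar ∈ pvPrimesI g := by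
    apply List.mem_map_of_mem
    rw [pvPrimesN, List.mem_filter, List.mem_range]
    exact ⟨hpsL, by simpa using hpst⟩
  have hsub := List.filter_sublist (p := fun a => decide (a ≤ (t : Int))) (l := pvPrimesI g)
  rcases Nat.lt_or_ge (((pvPrimesI g).filter (fun a => decide (a ≤ (t : Int)))).length)
      ((pvPrimesI g).length) with h | h
  · exact h
  · exfalso
    have heq := hsub.eq_of_length (by have := hsub.length_le; omega)
    rw [← heq] at hmem
    rw [List.mem_filter] at hmem
    have h2 := hmem.2
    simp only [decide_eq_true_eq, Int.ofNat_eq_natCast] at h2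
    omega

-- joint loop invariant: A's fold and B's fold run in lock step
theorem pv_fold_eq (g : List Bool) (limit : Int) (init : List Int)
    (hg0 : g.getD 0 false = false) (hL : limit.toNat < g.length)
    (pstar : Nat) (hpsL : pstar < g.length) (hpst : g.getD pstar false = true)
    (hpbig : limit < (pstar : Int)) :
    ∀ m : Nat, m ≤ limit.toNat →
      ((PySem.List.pyRange 1 ((m : Int)+1) 1).foldl
          (fun (st : List Int × Nat) x =>
            let p := pvWalk (pvPrimesI g) x st.2
            (st.1.set x.toNat (p : Int), p)) (init, 0)).1
        = ((PySem.List.pyRange 1 ((m : Int)+1) 1).foldl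
          (fun (st : List Int × Int) x =>
            let c := if PySem.List.pyGetD g x false then st.2 + 1 else st.2
            (st.1.set x.toNat c, c)) (init, 0)).1
      ∧ ((PySem.List.pyRange 1 ((m : Int)+1) 1).foldl
          (fun (st : List Int × Nat) x =>
            let p := pvWalk (pvPrimesI g) x st.2
            (st.1.set x.toNat (p : Int), p)) (init, 0)).2 = pvCnt g m
      ∧ ((PySem.List.pyRange 1 ((m : Int)+1) 1).foldl
          (fun (st : List Int × Int) x =>
            let c := if PySem.List.pyGetD g x false then st.2 + 1 else st.2
            (st.1.set x.toNat c, c)) (init, 0)).2 = (pvCnt g m : Int) := by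
  intro m
  induction m with
  | zero =>
      intro _
      rw [PySem.List.pyRange_one_eq_nil (by omega)]
      refine ⟨rfl, ?_, ?_⟩ <;> simp [pv_cnt_zero g hg0]
  | succ m ih =>
      intro hm
      obtain ⟨ih1, ih2, ih3⟩ := ih (by omega)
      have hrange : PySem.List.pyRange 1 ((↑(m+1) : Int)+1) 1
          = PySem.List.pyRange 1 ((m : Int)+1) 1 ++ [(m : Int)+1] := by
        rw [show ((↑(m+1) : Int)+1) = ((m : Int)+1)+1 by push_cast; ring]
        exact PySem.List.pyRange_one_succ_right (by omega)
      rw [hrange, List.foldl_append, List.foldl_append]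
      simp only [List.foldl_cons, List.foldl_nil]
      -- the single step at x = m+1
      have hx : ((m : Int) + 1) = ((m+1 : Nat) : Int) := by push_cast; ring
      have hwalk : pvWalk (pvPrimesI g) ((m : Int)+1) (pvCnt g m) = pvCnt g (m+1) := by
        have hmono : pvCnt g m ≤ pvCnt g (m+1) := by
          rw [pv_cnt_succ]; split <;> omega
        have hlen : pvCnt g (m+1) < (pvPrimesI g).length :=
          pv_cnt_lt g (m+1) pstar hpsL hpst (by omega) (by omega)
        have hbr : ((pvPrimesI g).filter (fun a => decide (a ≤ ((m : Int)+1)))).length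
            = pvCnt g (m+1) := by
          rw [hx, show (((m+1 : Nat) : Int)) = (((m+1 : Nat) : Nat) : Int) from rfl]
          exact pv_cnt_bridge g (m+1) (by omega)
        apply pvWalk_eq (pvCnt g (m+1) - pvCnt g m) _ _ _ _ rfl hmono hlen
        · intro i q hi hq
          have := pv_sorted_count (pvPrimesI g) (pv_primes_pairwise g) ((m : Int)+1) i q hq
          rw [hbr] at this
          exact this.mpr hi
        · intro q hq
          have := pv_sorted_count (pvPrimesI g) (pv_primes_pairwise g) ((m : Int)+1)
            (pvCnt g (m+1)) q hq
          rw [hbr] at this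
          by_contra hc
          exact absurd (this.mp (by omega)) (by omega)
      have hcntB : (if PySem.List.pyGetD g ((m : Int)+1) false then (pvCnt g m : Int) + 1
          else (pvCnt g m : Int)) = (pvCnt g (m+1) : Int) := by
        rw [hx, PySem.List.pyGetD_natCast, pv_cnt_succ]
        split <;> push_cast <;> ring
      refine ⟨?_, ?_, ?_⟩
      · simp only [ih1, ih2, ih3, hwalk, hcntB]
      · simp only [ih2, hwalk]
      · simp only [ih3, hcntB]


-- ===== VERDICT (by name: the statement is the Claim_ definition above) =====
theorem primepi_array_spec : Claim_equal_primepi_array := by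
  unfold Claim_equal_primepi_array Spec_primepi_array
  intro limit _ hpre
  obtain ⟨h49, hcase⟩ := hpre
  rw [primepi_array, primepi_array_alt]
  rcases (by omega : limit ≤ 0 ∨ 1 ≤ limit) with h0 | h0
  · rw [show PySem.List.pyRange 1 (limit+1) 1 = [] from PySem.List.pyRange_one_eq_nil (by omega)]
    rfl
  · -- limit ≥ 1
    rcases hcase with h | ⟨k, hk50, hk⟩
    · omega
    · set g := list_primality (limit + 50) with hg
      have hlen : g.length = (limit + 51).toNat := by
        rw [hg, list_primality_length]; congr 1; ring
      have hL : limit.toNat < g.length := by omega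
      have hpsL : limit.toNat + 1 + k < g.length := by omega
      have hpst : g.getD (limit.toNat + 1 + k) false = true := by
        rw [hg]
        apply list_primality_getD_prime _ _ (by omega) hk
        rw [show (limit + 50 + 1 : Int) = limit + 51 by ring]
        omega
      have hpbig : limit < ((limit.toNat + 1 + k : Nat) : Int) := by push_cast; omega
      have hfold := pv_fold_eq g limit (List.replicate (limit + 1).toNat 0)
        (list_primality_getD_zero _) hL _ hpsL hpst hpbig limit.toNat le_rfl
      rw [pv_primes_eq g]
      rw [show ((limit.toNat : Int) + 1) = limit + 1 by omega] at hfold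
      exact hfold.1
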